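-- pv_equiv track=rewrite | github.com/kalika15/Leetcode | Wifi Range - GFG/wifi-range.py | wifiRange
-- ===== SOURCE A (Python) =====
-- def wifiRange(num_rooms: int, room_map: str, router_range: int) -> bool:
--     # Initialize the end of the last covered range to be 0
--     last_covered_end = 0
--
--     # Iterate through each room in the map
--     for i in range(num_rooms):
--         # If the current room has wifi coverage
--         if room_map[i] == '1':
--             # Check if the previous router's coverage extends to the current room
--             if i - router_range > last_covered_end:
--                 # The current router's coverage does not extend to the current room
--                 return False
--
--             # Update the end of the last covered range to be the end of the current router's coverage
--             last_covered_end = i + router_range + 1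
--
--     # Check if the last covered range extends to the end of the room map
--     return last_covered_end >= num_rooms
-- ===== SOURCE B (Python) =====
-- def wifiRange(num_rooms: int, room_map: str, router_range: int) -> bool:
--     # Collect router positions first, then check three explicit coverage predicates.
--     pos = [i for i in range(num_rooms) if room_map[i] == '1']
--     if not pos:
--         return num_rooms <= 0
--     return (pos[0] - router_range <= 0
--             and pos[-1] + router_range + 1 >= num_rooms
--             and all(b - router_range <= a + router_range + 1
--                     for a, b in zip(pos, pos[1:])))
-- ===== Notes on version B (the rewrite author's own statement) =====
-- stated objective: simpler
-- what changed: Replaces the single stateful scan with a running last_covered_end accumulator and early return by first collecting the router positions and then returning the conjunction of three explicit predicates (start covered, end covered, no gap between consecutive routers).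
-- outside the precondition, e.g. on wifiRange(5, '101', 0): A returns False, B raises IndexError
import Mathlib
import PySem

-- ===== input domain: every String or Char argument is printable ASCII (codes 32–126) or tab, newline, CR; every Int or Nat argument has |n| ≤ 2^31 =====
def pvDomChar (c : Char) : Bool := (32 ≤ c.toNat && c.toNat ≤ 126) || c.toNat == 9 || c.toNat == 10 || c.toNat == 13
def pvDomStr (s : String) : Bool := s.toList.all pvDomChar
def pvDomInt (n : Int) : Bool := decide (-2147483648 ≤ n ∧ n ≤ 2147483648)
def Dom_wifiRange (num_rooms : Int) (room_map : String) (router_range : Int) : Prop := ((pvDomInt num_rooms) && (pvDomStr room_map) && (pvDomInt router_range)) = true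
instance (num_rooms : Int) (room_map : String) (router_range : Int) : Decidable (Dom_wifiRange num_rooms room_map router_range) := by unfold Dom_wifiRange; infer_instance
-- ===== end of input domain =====

-- B collects the router positions and returns the conjunction of three explicit
-- coverage predicates instead of A's stateful scan (objective: simpler).

-- ===== PORT A =====
-- the for-loop of A with its early returns; `none` from pyGet? is Python's IndexError (excluded by Pre_)
def pvALoop (room_map : String) (router_range num_rooms : Int) : List Int → Int → Bool
  | [], last_covered_end => decide (last_covered_end ≥ num_rooms)
  | i :: rest, last_covered_end =>
    match PySem.Str.pyGet? room_map i with
    | none => false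
    | some c =>
      if c = '1' then
        if i - router_range > last_covered_end then false
        else pvALoop room_map router_range num_rooms rest (i + router_range + 1)
      else pvALoop room_map router_range num_rooms rest last_covered_end

def wifiRange (num_rooms : Int) (room_map : String) (router_range : Int) : Bool :=
  pvALoop room_map router_range num_rooms (PySem.List.pyRange 0 num_rooms 1) 0

-- ===== PORT B =====
-- pos = [i for i in range(num_rooms) if room_map[i] == '1']
def pvBPos (num_rooms : Int) (room_map : String) : List Int :=
  (PySem.List.pyRange 0 num_rooms 1).filter (fun i => PySem.Str.pyGet? room_map i == some '1')

def wifiRange_alt (num_rooms : Int) (room_map : String) (router_range : Int) : Bool :=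
  match pvBPos num_rooms room_map with
  | [] => decide (num_rooms ≤ 0)
  | p0 :: ps =>
    decide (p0 - router_range ≤ 0) &&
    decide ((ps.getLastD p0) + router_range + 1 ≥ num_rooms) &&
    ((p0 :: ps).zip ps).all (fun ab => decide (ab.2 - router_range ≤ ab.1 + router_range + 1))

-- ===== PRECONDITION & SPEC =====
-- Pre_ excludes num_rooms > len(room_map): there A raises IndexError, except when an earlier
-- uncovered router makes it return False before reaching the out-of-range index; B's position
-- comprehension raises IndexError on all such inputs.
def Pre_wifiRange (num_rooms : Int) (room_map : String) (router_range : Int) : Prop :=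
  num_rooms ≤ (room_map.length : Int)
instance (num_rooms : Int) (room_map : String) (router_range : Int) : Decidable (Pre_wifiRange num_rooms room_map router_range) := by unfold Pre_wifiRange; infer_instance
def pvWitness_wifiRange : Int × String × Int := (3, "101", 1)

def Spec_wifiRange (num_rooms : Int) (room_map : String) (router_range : Int) (out : Bool) : Prop := out = wifiRange_alt num_rooms room_map router_range
instance (num_rooms : Int) (room_map : String) (router_range : Int) (out : Bool) : Decidable (Spec_wifiRange num_rooms room_map router_range out) := by unfold Spec_wifiRange; infer_instance

-- ===== CLAIM (what is proved, stated in full; the proofs are below) =====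
def Claim_equal_wifiRange : Prop := ∀ (num_rooms : Int) (room_map : String) (router_range : Int), Dom_wifiRange num_rooms room_map router_range → Pre_wifiRange num_rooms room_map router_range → Spec_wifiRange num_rooms room_map router_range (wifiRange num_rooms room_map router_range)

-- ===== LEMMAS AND PROOFS =====

-- proof-side chain predicate: router at `prev` already accepted, `l` the remaining routers
def pvChain (num_rooms router_range : Int) : Int → List Int → Bool
  | prev, [] => decide (prev + router_range + 1 ≥ num_rooms)
  | prev, q :: qs => decide (q - router_range ≤ prev + router_range + 1) && pvChain num_rooms router_range q qs

-- A's loop, characterised by the filtered position list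
theorem pvALoop_eq_chain (m : String) (r n : Int) (is : List Int) (lce : Int)
    (h : ∀ i ∈ is, ∃ c, PySem.Str.pyGet? m i = some c) :
    pvALoop m r n is lce =
      match is.filter (fun i => PySem.Str.pyGet? m i == some '1') with
      | [] => decide (lce ≥ n)
      | q :: qs => decide (q - r ≤ lce) && pvChain n r q qs := by
  induction is generalizing lce with
  | nil => rfl
  | cons i rest ih =>
    obtain ⟨c, hc⟩ := h i (by simp)
    have hc' : PySem.List.pyGet? m.toList i = some c := by simpa using hc
    have hrest : ∀ j ∈ rest, ∃ c, PySem.Str.pyGet? m j = some c := fun j hj => h j (by simp [hj])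
    have hL : pvALoop m r n (i :: rest) lce =
        (if c = '1' then (if i - r > lce then false else pvALoop m r n rest (i + r + 1))
         else pvALoop m r n rest lce) := by
      simp only [pvALoop, hc]
    by_cases h1 : c = '1'
    · subst h1
      have hfilter : (i :: rest).filter (fun i => PySem.Str.pyGet? m i == some '1')
          = i :: rest.filter (fun i => PySem.Str.pyGet? m i == some '1') := by
        simp [hc']
      rw [hfilter]
      by_cases hv : i - r > lce
      · have hd : decide (i - r ≤ lce) = false := by simp; omega
        rw [hL, if_pos rfl, if_pos hv]
        dsimp only
        rw [hd, Bool.false_and]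
      · have hd : decide (i - r ≤ lce) = true := by simp; omega
        rw [hL, if_pos rfl, if_neg hv, ih _ hrest]
        dsimp only
        rw [hd, Bool.true_and]
        cases rest.filter (fun i => PySem.Str.pyGet? m i == some '1') <;> rfl
    · have hfilter : (i :: rest).filter (fun i => PySem.Str.pyGet? m i == some '1')
          = rest.filter (fun i => PySem.Str.pyGet? m i == some '1') := by
        simp [hc', h1]
      rw [hfilter, hL, if_neg h1, ih _ hrest]

-- B's three-predicate form equals the chain
theorem pvChain_eq_B (n r : Int) (p0 : Int) (ps : List Int) :
    pvChain n r p0 ps =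
      (decide ((ps.getLastD p0) + r + 1 ≥ n) &&
       ((p0 :: ps).zip ps).all (fun ab => decide (ab.2 - r ≤ ab.1 + r + 1))) := by
  induction ps generalizing p0 with
  | nil => simp [pvChain]
  | cons q qs ih =>
    simp only [pvChain, List.getLastD_cons, List.zip_cons_cons, List.all_cons]
    rw [ih q, Bool.and_left_comm]

-- ===== VERDICT (by name: the statement is the Claim_ definition above) =====
theorem wifiRange_spec : Claim_equal_wifiRange := by
  intro n m r _ hpre
  unfold Pre_wifiRange at hpre
  unfold Spec_wifiRange wifiRange wifiRange_alt pvBPos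
  rw [pvALoop_eq_chain m r n _ 0 (by
    intro i hi
    rw [PySem.List.mem_pyRange_one] at hi
    obtain ⟨hi1, hi2⟩ := hi
    refine Option.ne_none_iff_exists'.mp ?_
    simp [PySem.List.pyGet?_eq_none_iff, PySem.Raise.InRange]
    omega)]
  cases hfil : (PySem.List.pyRange 0 n 1).filter (fun i => PySem.Str.pyGet? m i == some '1') with
  | nil => rfl
  | cons p0 ps =>
    dsimp only
    rw [pvChain_eq_B, Bool.and_assoc]
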